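-- pv_equiv track=rewrite | github.com/gbdev/GBEmulatorShootout | main.py | _matches_emulator_filter
-- ===== SOURCE A (Python) =====
-- def _normalize_emulator_keyword(value):
--     return "".join(c for c in str(value).lower() if c.isalnum())
--
-- def _matches_emulator_filter(filter_data, keywords):
--     if filter_data is None:
--         return True
--     normalized_keywords = {_normalize_emulator_keyword(keyword) for keyword in keywords}
--
--     out_filter = False
--     for f in filter_data:
--         if f.startswith("!"):
--             out_filter = True
--             if _normalize_emulator_keyword(f[1:]) in normalized_keywords:
--                 return False
--     if out_filter:
--         return True
--
--     for f in filter_data: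
--         if not f.startswith("!") and _normalize_emulator_keyword(f) in normalized_keywords:
--             return True
--     return False
-- ===== SOURCE B (Python) =====
-- def _normalize_emulator_keyword(value):
--     return "".join(c for c in str(value).lower() if c.isalnum())
--
-- def _matches_emulator_filter(filter_data, keywords):
--     if filter_data is None:
--         return True
--     # Index the FILTERS into hash sets, then scan the KEYWORDS against them
--     # (A does the reverse: it hashes the keywords and scans the filters).
--     excludes = {_normalize_emulator_keyword(f[1:]) for f in filter_data if f.startswith("!")}
--     if excludes:
--         return all(_normalize_emulator_keyword(k) not in excludes for k in keywords)
--     includes = {_normalize_emulator_keyword(f) for f in filter_data if not f.startswith("!")}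
--     return any(_normalize_emulator_keyword(k) in includes for k in keywords)
-- ===== Notes on version B (the rewrite author's own statement) =====
-- stated objective: alternative
-- what changed: B inverts the lookup direction: instead of A's hashing of the keywords followed by two flagged scans over the filters, B builds hash sets of the normalized filters (excludes / includes) and scans the keywords once against them, deciding by all()/any().
import Mathlib
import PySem

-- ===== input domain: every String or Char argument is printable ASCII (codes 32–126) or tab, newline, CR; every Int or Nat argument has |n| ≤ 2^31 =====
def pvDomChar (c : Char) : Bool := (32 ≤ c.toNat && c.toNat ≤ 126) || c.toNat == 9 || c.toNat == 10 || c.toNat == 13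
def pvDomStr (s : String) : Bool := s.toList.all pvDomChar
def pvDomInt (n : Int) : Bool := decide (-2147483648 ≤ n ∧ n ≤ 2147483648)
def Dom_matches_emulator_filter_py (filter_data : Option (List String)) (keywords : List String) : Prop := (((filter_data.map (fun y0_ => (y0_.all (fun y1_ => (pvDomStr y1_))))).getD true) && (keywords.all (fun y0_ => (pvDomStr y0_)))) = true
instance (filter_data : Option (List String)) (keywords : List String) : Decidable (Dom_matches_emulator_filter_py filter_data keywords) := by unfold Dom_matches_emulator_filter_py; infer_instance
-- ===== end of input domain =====

-- B inverts the lookup direction: it hash-indexes the normalized FILTERS (excludes / includes)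
-- and scans the KEYWORDS once against them, where A hashes the keywords and scans the filters twice.

-- shared helper: _normalize_emulator_keyword (lowercase, keep alphanumeric chars)
def pvNorm (s : String) : String :=
  String.ofList ((PySem.Chars.lower s.toList).filter PySem.Chars.isalnum)

-- ===== PORT A =====
-- first loop of A: returns (early_return_false, out_filter)
def pvALoop1 (nk : PySem.Set String) : List String → Bool → Bool × Bool
  | [], outf => (false, outf)
  | f :: rest, outf =>
    if PySem.Str.startswith f "!" then
      if PySem.Set.contains nk (pvNorm (PySem.Str.slice f (some 1) none)) then (true, true)
      else pvALoop1 nk rest true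
    else pvALoop1 nk rest outf

-- second loop of A
def pvALoop2 (nk : PySem.Set String) : List String → Bool
  | [] => false
  | f :: rest =>
    if !(PySem.Str.startswith f "!") && PySem.Set.contains nk (pvNorm f) then true
    else pvALoop2 nk rest

def matches_emulator_filter_py (filter_data : Option (List String)) (keywords : List String) : Bool :=
  match filter_data with
  | none => true
  | some fd =>
    let nk : PySem.Set String := PySem.Set.ofList (keywords.map pvNorm)
    match pvALoop1 nk fd false with
    | (true, _) => false
    | (false, outf) => if outf then true else pvALoop2 nk fd

-- ===== PORT B =====
def matches_emulator_filter_py_alt (filter_data : Option (List String)) (keywords : List String) : Bool :=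
  match filter_data with
  | none => true
  | some fd =>
    let ex : PySem.Set String :=
      PySem.Set.ofList ((fd.filter (fun f => PySem.Str.startswith f "!")).map
        (fun f => pvNorm (PySem.Str.slice f (some 1) none)))
    if ex ≠ [] then
      keywords.all (fun k => !(PySem.Set.contains ex (pvNorm k)))
    else
      let inc : PySem.Set String :=
        PySem.Set.ofList ((fd.filter (fun f => !(PySem.Str.startswith f "!"))).map pvNorm)
      keywords.any (fun k => PySem.Set.contains inc (pvNorm k))

-- ===== PRECONDITION & SPEC =====
def Spec_matches_emulator_filter_py (filter_data : Option (List String)) (keywords : List String) (out : Bool) : Prop := out = matches_emulator_filter_py_alt filter_data keywords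
instance (filter_data : Option (List String)) (keywords : List String) (out : Bool) : Decidable (Spec_matches_emulator_filter_py filter_data keywords out) := by unfold Spec_matches_emulator_filter_py; infer_instance

-- ===== CLAIM (what is proved, stated in full; the proofs are below) =====
def Claim_equal_matches_emulator_filter_py : Prop := ∀ (filter_data : Option (List String)) (keywords : List String), Dom_matches_emulator_filter_py filter_data keywords → Spec_matches_emulator_filter_py filter_data keywords (matches_emulator_filter_py filter_data keywords)

-- ===== LEMMAS AND PROOFS =====

theorem pvALoop1_eq (nk : PySem.Set String) (l : List String) (outf : Bool) :
    pvALoop1 nk l outf =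
      ((l.filter (fun f => PySem.Str.startswith f "!")).any
          (fun f => PySem.Set.contains nk (pvNorm (PySem.Str.slice f (some 1) none))),
       outf || l.any (fun f => PySem.Str.startswith f "!")) := by
  induction l generalizing outf with
  | nil => simp [pvALoop1]
  | cons f rest ih =>
    by_cases h : PySem.Chars.startswith f.toList ['!'] = true
    · by_cases hc : pvNorm (PySem.Str.slice f (some 1) none) ∈ nk <;>
        simp [pvALoop1, h, hc, ih, PySem.Set.contains]
    · simp [pvALoop1, h, ih]

theorem pvALoop2_eq (nk : PySem.Set String) (l : List String) :
    pvALoop2 nk l =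
      (l.filter (fun f => !(PySem.Str.startswith f "!"))).any
        (fun f => PySem.Set.contains nk (pvNorm f)) := by
  induction l with
  | nil => rfl
  | cons f rest ih =>
    by_cases h : PySem.Chars.startswith f.toList ['!'] = true <;>
      simp [pvALoop2, h, ih]

-- membership-based exchange: "some filter's norm is among the keyword norms" ↔
-- "some keyword's norm is among the filter norms"
theorem pvSwap (g : String → String) (l kw : List String) :
    (l.any (fun f => PySem.Set.contains (PySem.Set.ofList (kw.map pvNorm)) (g f)))
      = (kw.any (fun k => PySem.Set.contains (PySem.Set.ofList (l.map g)) (pvNorm k))) := by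
  rw [Bool.eq_iff_iff]
  simp only [List.any_eq_true, PySem.Set.contains, List.contains_iff_mem,
    PySem.Set.mem_ofList, List.mem_map]
  constructor
  · rintro ⟨f, hf, k, hk, he⟩; exact ⟨k, hk, f, hf, he.symm⟩
  · rintro ⟨k, hk, f, hf, he⟩; exact ⟨f, hf, k, hk, he.symm⟩

-- the exclude set of B is empty iff A's out_filter stays false
theorem pvExNil (fd : List String) :
    (PySem.Set.ofList ((fd.filter (fun f => PySem.Str.startswith f "!")).map
        (fun f => pvNorm (PySem.Str.slice f (some 1) none))) = []) ↔
      (fd.any (fun f => PySem.Str.startswith f "!") = false) := by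
  rw [List.eq_nil_iff_forall_not_mem]
  simp only [PySem.Set.mem_ofList, List.mem_map, List.mem_filter, List.any_eq_false]
  constructor
  · intro h f hf
    by_contra hs
    exact h _ ⟨f, ⟨hf, by simpa using hs⟩, rfl⟩
  · rintro h x ⟨f, ⟨hf, hs⟩, _⟩
    have := h f hf
    simp_all

-- boolean shape: A's flagged match vs B's partitioned decision
theorem pvCombine (E S I : Bool) (ex : List String)
    (h1 : ex = [] ↔ S = false) (h2 : E = true → ex ≠ []) :
    (match (E, S) with
     | (true, _) => false
     | (false, outf) => if outf = true then true else I) = (if ex ≠ [] then !E else I) := by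
  by_cases hx : ex = [] <;> cases E <;> cases S <;> simp_all

-- ===== VERDICT (by name: the statement is the Claim_ definition above) =====
theorem matches_emulator_filter_py_spec : Claim_equal_matches_emulator_filter_py := by
  intro filter_data keywords _
  unfold Spec_matches_emulator_filter_py
  match filter_data with
  | none => rfl
  | some fd =>
    simp only [matches_emulator_filter_py, matches_emulator_filter_py_alt,
      pvALoop1_eq, pvALoop2_eq, Bool.false_or]
    rw [pvSwap (fun f => pvNorm (PySem.Str.slice f (some 1) none))
          (fd.filter (fun f => PySem.Str.startswith f "!")) keywords,
        pvSwap pvNorm (fd.filter (fun f => !(PySem.Str.startswith f "!"))) keywords]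
    simp only [List.all_eq_not_any_not, Bool.not_not]
    refine pvCombine _ _ _ _ (pvExNil fd) ?_
    · intro hE
      simp only [List.any_eq_true, PySem.Set.contains, List.contains_iff_mem] at hE
      obtain ⟨k, _, hk⟩ := hE
      exact List.ne_nil_of_mem hk
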